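-- pv_equiv track=rewrite | github.com/pypi-data/pypi-mirror-395 | packages/fm-prime/fm_prime-1.0.9-py3-none-any.whl/fm_prime/primeFractal.py | classify_indices
-- ===== SOURCE A (Python) =====
-- def is_semi_prime(n, pattern_type):
--     """
--     Determine if a given index n corresponds to a semi-prime based on the equations.
--     pattern_type: "6n+1" or "6n-1"
--     """
--     for k in range(1, n):  # Explore possible k values
--         for kk in range(1, n):  # Explore possible kk values
--             if pattern_type == "6n+1":
--                 if (6 * k + 1) * (6 * kk + 1) == 6 * n + 1:
--                     return True
--                 if (6 * k - 1) * (6 * kk - 1) == 6 * n + 1: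
--                     return True
--             elif pattern_type == "6n-1":
--                 if (6 * k - 1) * (6 * kk + 1) == 6 * n - 1:
--                     return True
--                 if (6 * k + 1) * (6 * kk - 1) == 6 * n - 1:
--                     return True
--     return False
--
-- def classify_indices(max_n):
--     """
--     Classify indices n into primes and semi-primes using fractal-like logic.
--     """
--     primes1 = []
--     semi_primes1 = []
--
--     primes2 = []
--     semi_primes2 = []
--     for n in range(1, max_n + 1):
--         pattern1 = 6*n+1
--         pattern2 = 6*n-1
--         if is_semi_prime(n, "6n+1"):
--             semi_primes1.append(pattern1)
--         else:
--             primes1.append(pattern1)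
--         if is_semi_prime(n, "6n-1"):
--             semi_primes2.append(pattern2)
--         else:
--             primes2.append(pattern2)
--
--     return primes1, semi_primes1, primes2, semi_primes2
-- ===== SOURCE B (Python) =====
-- def _hits(d, x, s, n):
--     # True iff x == d * (6*kk + s) for some kk in range(1, n)
--     if x % d != 0:
--         return False
--     q = x // d
--     return q % 6 == s % 6 and 1 <= (q - s) // 6 < n
--
-- def _is_semi(n, sign):
--     # x = 6*n + sign is a product of two 6k±1 factors with indices in range(1, n)
--     x = 6 * n + sign
--     for k in range(1, n):
--         if _hits(6 * k + 1, x, sign, n) or _hits(6 * k - 1, x, -sign, n):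
--             return True
--     return False
--
-- def classify_indices(max_n):
--     ns = list(range(1, max_n + 1))
--     primes1      = [6 * n + 1 for n in ns if not _is_semi(n, 1)]
--     semi_primes1 = [6 * n + 1 for n in ns if _is_semi(n, 1)]
--     primes2      = [6 * n - 1 for n in ns if not _is_semi(n, -1)]
--     semi_primes2 = [6 * n - 1 for n in ns if _is_semi(n, -1)]
--     return primes1, semi_primes1, primes2, semi_primes2
-- ===== Notes on version B (the rewrite author's own statement) =====
-- stated objective: faster
-- what changed: B drops A's inner brute-force loop over all candidate cofactor indices kk: for each candidate factor 6k±1 it decides with one divisibility test and a quotient/residue computation whether a matching cofactor index exists, and builds the four result lists with comprehensions.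
import Mathlib
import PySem

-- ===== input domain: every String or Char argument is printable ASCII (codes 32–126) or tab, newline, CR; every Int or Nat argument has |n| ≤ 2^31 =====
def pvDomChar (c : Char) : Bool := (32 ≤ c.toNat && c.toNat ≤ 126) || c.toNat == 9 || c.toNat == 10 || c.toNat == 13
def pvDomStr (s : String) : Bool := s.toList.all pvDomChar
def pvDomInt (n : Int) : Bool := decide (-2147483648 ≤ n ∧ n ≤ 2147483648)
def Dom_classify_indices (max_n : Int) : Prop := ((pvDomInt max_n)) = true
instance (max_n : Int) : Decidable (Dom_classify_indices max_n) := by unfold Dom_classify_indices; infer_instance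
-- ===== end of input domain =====

-- B replaces A's inner brute-force scan over all cofactor indices kk by a single
-- divisibility/quotient check per candidate factor (O(max_n^2) instead of O(max_n^3)).

-- ===== PORT A =====
def is_semi_prime (n : Int) (pattern_type : String) : Bool :=
  (PySem.List.pyRange 1 n 1).any (fun k =>
    (PySem.List.pyRange 1 n 1).any (fun kk =>
      if pattern_type = "6n+1" then
        ((6 * k + 1) * (6 * kk + 1) == 6 * n + 1) || ((6 * k - 1) * (6 * kk - 1) == 6 * n + 1)
      else if pattern_type = "6n-1" then
        ((6 * k - 1) * (6 * kk + 1) == 6 * n - 1) || ((6 * k + 1) * (6 * kk - 1) == 6 * n - 1)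
      else false))

-- the body of A's classify loop, appending to the four accumulators
def classifyStepA (acc : List Int × List Int × List Int × List Int) (n : Int) :
    List Int × List Int × List Int × List Int :=
  let pattern1 := 6 * n + 1
  let pattern2 := 6 * n - 1
  let acc1 := if is_semi_prime n "6n+1" then (acc.1, acc.2.1 ++ [pattern1], acc.2.2.1, acc.2.2.2)
              else (acc.1 ++ [pattern1], acc.2.1, acc.2.2.1, acc.2.2.2)
  if is_semi_prime n "6n-1" then (acc1.1, acc1.2.1, acc1.2.2.1, acc1.2.2.2 ++ [pattern2])
  else (acc1.1, acc1.2.1, acc1.2.2.1 ++ [pattern2], acc1.2.2.2)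

def classify_indices (max_n : Int) : List Int × List Int × List Int × List Int :=
  (PySem.List.pyRange 1 (max_n + 1) 1).foldl classifyStepA ([], [], [], [])

-- ===== PORT B =====
-- True iff x == d * (6*kk + s) for some kk in range(1, n)
def pvHits (d x s n : Int) : Bool :=
  if PySem.Int.mod x d ≠ 0 then false
  else
    let q := PySem.Int.floordiv x d
    (PySem.Int.mod q 6 == PySem.Int.mod s 6) &&
      (1 ≤ PySem.Int.floordiv (q - s) 6 && PySem.Int.floordiv (q - s) 6 < n)

def pvIsSemi (n sign : Int) : Bool :=
  let x := 6 * n + sign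
  (PySem.List.pyRange 1 n 1).any (fun k =>
    pvHits (6 * k + 1) x sign n || pvHits (6 * k - 1) x (-sign) n)

def classify_indices_alt (max_n : Int) : List Int × List Int × List Int × List Int :=
  let ns := PySem.List.pyRange 1 (max_n + 1) 1
  ((ns.filter (fun n => !pvIsSemi n 1)).map (fun n => 6 * n + 1),
   (ns.filter (fun n => pvIsSemi n 1)).map (fun n => 6 * n + 1),
   (ns.filter (fun n => !pvIsSemi n (-1))).map (fun n => 6 * n - 1),
   (ns.filter (fun n => pvIsSemi n (-1))).map (fun n => 6 * n - 1))

-- ===== PRECONDITION & SPEC =====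
def Spec_classify_indices (max_n : Int) (out : List Int × List Int × List Int × List Int) : Prop := out = classify_indices_alt max_n
instance (max_n : Int) (out : List Int × List Int × List Int × List Int) : Decidable (Spec_classify_indices max_n out) := by unfold Spec_classify_indices; infer_instance

-- ===== CLAIM (what is proved, stated in full; the proofs are below) =====
def Claim_equal_classify_indices : Prop := ∀ (max_n : Int), Dom_classify_indices max_n → Spec_classify_indices max_n (classify_indices max_n)

-- ===== LEMMAS AND PROOFS =====

lemma any_or_split {α : Type} (l : List α) (f g : α → Bool) :
    l.any (fun a => f a || g a) = (l.any f || l.any g) := by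
  induction l with
  | nil => simp
  | cons a t ih =>
    simp only [List.any_cons, ih]
    cases f a <;> cases g a <;> simp

-- A's inner scan for a cofactor 6*kk+1 equals B's divisibility check (s = 1)
lemma any_factor_pos (d x n : Int) (hd : 0 < d) :
    (PySem.List.pyRange 1 n 1).any (fun kk => d * (6 * kk + 1) == x) = pvHits d x 1 n := by
  unfold pvHits
  rw [Bool.eq_iff_iff]
  simp only [List.any_eq_true, PySem.List.mem_pyRange_one,
    PySem.Int.mod_eq_emod_of_pos hd, PySem.Int.floordiv_eq_ediv_of_pos hd,
    PySem.Int.mod_eq_emod_of_pos (by norm_num : (0:Int) < 6),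
    PySem.Int.floordiv_eq_ediv_of_pos (by norm_num : (0:Int) < 6)]
  constructor
  · rintro ⟨kk, ⟨h1, h2⟩, heq⟩
    rw [beq_iff_eq] at heq
    subst heq
    rw [if_neg (by simp [Int.mul_emod_right])]
    rw [Int.mul_ediv_cancel_left _ (ne_of_gt hd)]
    simp only [Bool.and_eq_true, beq_iff_eq, decide_eq_true_eq]
    omega
  · intro h
    by_cases h0 : (x % d ≠ 0)
    · rw [if_pos h0] at h; exact absurd h (by simp)
    rw [if_neg h0] at h
    push_neg at h0
    simp only [Bool.and_eq_true, beq_iff_eq, decide_eq_true_eq] at h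
    obtain ⟨h6, hlo, hhi⟩ := h
    have hx : d * (x / d) = x := by
      have := Int.ediv_add_emod x d
      omega
    refine ⟨(x / d - 1) / 6, ⟨hlo, hhi⟩, ?_⟩
    rw [beq_iff_eq]
    have hq : 6 * ((x / d - 1) / 6) + 1 = x / d := by omega
    rw [hq, hx]

-- A's inner scan for a cofactor 6*kk-1 equals B's divisibility check (s = -1)
lemma any_factor_neg (d x n : Int) (hd : 0 < d) :
    (PySem.List.pyRange 1 n 1).any (fun kk => d * (6 * kk - 1) == x) = pvHits d x (-1) n := by
  unfold pvHits
  rw [Bool.eq_iff_iff]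
  simp only [List.any_eq_true, PySem.List.mem_pyRange_one,
    PySem.Int.mod_eq_emod_of_pos hd, PySem.Int.floordiv_eq_ediv_of_pos hd,
    PySem.Int.mod_eq_emod_of_pos (by norm_num : (0:Int) < 6),
    PySem.Int.floordiv_eq_ediv_of_pos (by norm_num : (0:Int) < 6)]
  constructor
  · rintro ⟨kk, ⟨h1, h2⟩, heq⟩
    rw [beq_iff_eq] at heq
    subst heq
    rw [if_neg (by simp [Int.mul_emod_right])]
    rw [Int.mul_ediv_cancel_left _ (ne_of_gt hd)]
    simp only [Bool.and_eq_true, beq_iff_eq, decide_eq_true_eq]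
    omega
  · intro h
    by_cases h0 : (x % d ≠ 0)
    · rw [if_pos h0] at h; exact absurd h (by simp)
    rw [if_neg h0] at h
    push_neg at h0
    simp only [Bool.and_eq_true, beq_iff_eq, decide_eq_true_eq] at h
    obtain ⟨h6, hlo, hhi⟩ := h
    have hx : d * (x / d) = x := by
      have := Int.ediv_add_emod x d
      omega
    refine ⟨(x / d + 1) / 6, ⟨hlo, hhi⟩, ?_⟩
    rw [beq_iff_eq]
    have hq : 6 * ((x / d + 1) / 6) - 1 = x / d := by omega
    rw [hq, hx]

lemma semi1_eq (n : Int) : is_semi_prime n "6n+1" = pvIsSemi n 1 := by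
  unfold is_semi_prime pvIsSemi
  refine PySem.List.any_congr_mem ?_
  intro k hk
  rw [PySem.List.mem_pyRange_one] at hk
  simp only [eq_self_iff_true, if_true]
  rw [any_or_split]
  congr 1
  · exact any_factor_pos (6 * k + 1) (6 * n + 1) n (by omega)
  · exact any_factor_neg (6 * k - 1) (6 * n + 1) n (by omega)

lemma semi2_eq (n : Int) : is_semi_prime n "6n-1" = pvIsSemi n (-1) := by
  unfold is_semi_prime pvIsSemi
  refine PySem.List.any_congr_mem ?_
  intro k hk
  rw [PySem.List.mem_pyRange_one] at hk
  simp only [if_neg (by decide : ¬ ("6n-1" : String) = "6n+1"), eq_self_iff_true, if_true]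
  rw [any_or_split, show (6:Int) * n + -1 = 6 * n - 1 from by ring, neg_neg]
  conv_rhs => rw [Bool.or_comm]
  congr 1
  · exact any_factor_pos (6 * k - 1) (6 * n - 1) n (by omega)
  · exact any_factor_neg (6 * k + 1) (6 * n - 1) n (by omega)

lemma foldl_classifyStepA (l : List Int) (p1 s1 p2 s2 : List Int) :
    l.foldl classifyStepA (p1, s1, p2, s2) =
      (p1 ++ (l.filter (fun n => !is_semi_prime n "6n+1")).map (fun n => 6 * n + 1),
       s1 ++ (l.filter (fun n => is_semi_prime n "6n+1")).map (fun n => 6 * n + 1),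
       p2 ++ (l.filter (fun n => !is_semi_prime n "6n-1")).map (fun n => 6 * n - 1),
       s2 ++ (l.filter (fun n => is_semi_prime n "6n-1")).map (fun n => 6 * n - 1)) := by
  induction l generalizing p1 s1 p2 s2 with
  | nil => simp
  | cons a t ih =>
    simp only [List.foldl_cons, List.filter_cons]
    by_cases h1 : is_semi_prime a "6n+1" <;> by_cases h2 : is_semi_prime a "6n-1" <;>
      simp [classifyStepA, h1, h2, ih]

theorem classify_eq (max_n : Int) : classify_indices max_n = classify_indices_alt max_n := by
  unfold classify_indices classify_indices_alt
  rw [foldl_classifyStepA]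
  simp only [List.nil_append, semi1_eq, semi2_eq]

-- ===== VERDICT (by name: the statement is the Claim_ definition above) =====
theorem classify_indices_spec : Claim_equal_classify_indices := by
  intro max_n _
  exact classify_eq max_n
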